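-- pv_equiv track=rewrite | github.com/David-Oso/Python-project | David_python_project/assignment_2/christmas_song.py | generate_lyrics
-- ===== SOURCE A (Python) =====
-- def generate_lyrics(day):
--     lyrics = ""
--     for count in range(day, 0, -1):
--         match count:
--             case 12:
--                 lyrics += "Twelve drummers drumming\n"
--             case 11:
--                 lyrics += "Eleven pipers piping\n"
--             case 10:
--                 lyrics += "Ten lords a-leaping\n"
--             case 9:
--                 lyrics += "Nine ladies dancing\n"
--             case 8:
--                 lyrics += 'Eight maids a-milking\n'
--             case 7:
--                 lyrics += 'Seven swans a-swimming\n'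
--             case 6:
--                 lyrics += 'Six geese a-laying\n'
--             case 5:
--                 lyrics += 'Five golden rings\n'
--             case 4:
--                 lyrics += 'Four calling birds\n'
--             case 3:
--                 lyrics += 'Three french hens\n'
--             case 2:
--                 lyrics += "Two turtle doves\n"
--             case 1:
--                 lyrics += 'And a partridge in a pear tree\n'
--     return lyrics
-- ===== SOURCE B (Python) =====
-- _LINES_DESC = [
--     "Twelve drummers drumming\n",
--     "Eleven pipers piping\n",
--     "Ten lords a-leaping\n",
--     "Nine ladies dancing\n",
--     "Eight maids a-milking\n",
--     "Seven swans a-swimming\n",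
--     "Six geese a-laying\n",
--     "Five golden rings\n",
--     "Four calling birds\n",
--     "Three french hens\n",
--     "Two turtle doves\n",
--     "And a partridge in a pear tree\n",
-- ]
--
--
-- def generate_lyrics(day):
--     if day <= 0:
--         return ""
--     return "".join(_LINES_DESC[max(12 - day, 0):])
-- ===== Notes on version B (the rewrite author's own statement) =====
-- stated objective: simpler
-- what changed: Replaces the count-down loop with a per-count match by a precomputed descending lyric table and a single clamped slice joined once; the loop and the match disappear.
import Mathlib
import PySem

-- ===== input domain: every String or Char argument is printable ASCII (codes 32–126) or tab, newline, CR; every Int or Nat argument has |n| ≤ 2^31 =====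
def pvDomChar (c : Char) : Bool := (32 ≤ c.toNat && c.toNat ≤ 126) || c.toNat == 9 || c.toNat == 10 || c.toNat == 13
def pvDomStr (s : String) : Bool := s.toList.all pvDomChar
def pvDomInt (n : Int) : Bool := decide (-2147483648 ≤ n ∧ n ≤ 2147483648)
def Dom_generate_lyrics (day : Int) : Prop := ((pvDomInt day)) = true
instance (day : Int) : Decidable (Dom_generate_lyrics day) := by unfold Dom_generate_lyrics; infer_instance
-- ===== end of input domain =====

-- B replaces the count-down loop with a 12-way match by a precomputed descending
-- lyric table, one clamped slice and one join (objective: simpler).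

-- ===== PORT A =====
def generate_lyrics (day : Int) : String :=
  (PySem.List.pyRange day 0 (-1)).foldl (fun lyrics count =>
    if count = 12 then lyrics ++ "Twelve drummers drumming\n"
    else if count = 11 then lyrics ++ "Eleven pipers piping\n"
    else if count = 10 then lyrics ++ "Ten lords a-leaping\n"
    else if count = 9 then lyrics ++ "Nine ladies dancing\n"
    else if count = 8 then lyrics ++ "Eight maids a-milking\n"
    else if count = 7 then lyrics ++ "Seven swans a-swimming\n"
    else if count = 6 then lyrics ++ "Six geese a-laying\n"
    else if count = 5 then lyrics ++ "Five golden rings\n"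
    else if count = 4 then lyrics ++ "Four calling birds\n"
    else if count = 3 then lyrics ++ "Three french hens\n"
    else if count = 2 then lyrics ++ "Two turtle doves\n"
    else if count = 1 then lyrics ++ "And a partridge in a pear tree\n"
    else lyrics) ""

-- ===== PORT B =====
def linesDesc : List String :=
  ["Twelve drummers drumming\n",
   "Eleven pipers piping\n",
   "Ten lords a-leaping\n",
   "Nine ladies dancing\n",
   "Eight maids a-milking\n",
   "Seven swans a-swimming\n",
   "Six geese a-laying\n",
   "Five golden rings\n",
   "Four calling birds\n",
   "Three french hens\n",
   "Two turtle doves\n",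
   "And a partridge in a pear tree\n"]

def generate_lyrics_alt (day : Int) : String :=
  if day ≤ 0 then ""
  else PySem.Str.join "" (PySem.List.slice linesDesc (some (max (12 - day) 0)) none)

-- ===== PRECONDITION & SPEC =====
def Spec_generate_lyrics (day : Int) (out : String) : Prop := out = generate_lyrics_alt day
instance (day : Int) (out : String) : Decidable (Spec_generate_lyrics day out) := by unfold Spec_generate_lyrics; infer_instance

-- ===== CLAIM (what is proved, stated in full; the proofs are below) =====
def Claim_equal_generate_lyrics : Prop := ∀ (day : Int), Dom_generate_lyrics day → Spec_generate_lyrics day (generate_lyrics day)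


-- ===== LEMMAS AND PROOFS =====
theorem gl_step_13 (day : Int) (h : 13 ≤ day) :
    generate_lyrics day = generate_lyrics (day - 1) := by
  unfold generate_lyrics
  rw [PySem.List.pyRange_neg_one_cons (by omega : (0:Int) < day)]
  simp only [List.foldl_cons]
  have h12 : ¬ day = 12 := by omega
  have h11 : ¬ day = 11 := by omega
  have h10 : ¬ day = 10 := by omega
  have h9 : ¬ day = 9 := by omega
  have h8 : ¬ day = 8 := by omega
  have h7 : ¬ day = 7 := by omega
  have h6 : ¬ day = 6 := by omega
  have h5 : ¬ day = 5 := by omega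
  have h4 : ¬ day = 4 := by omega
  have h3 : ¬ day = 3 := by omega
  have h2 : ¬ day = 2 := by omega
  have h1 : ¬ day = 1 := by omega
  simp [h12, h11, h10, h9, h8, h7, h6, h5, h4, h3, h2, h1]

theorem alt_step_13 (day : Int) (h : 13 ≤ day) :
    generate_lyrics_alt day = generate_lyrics_alt (day - 1) := by
  unfold generate_lyrics_alt
  have hm : max (12 - day) 0 = 0 := by omega
  have hm' : max (12 - (day - 1)) 0 = 0 := by omega
  rw [hm, hm', if_neg (by omega : ¬ day ≤ 0), if_neg (by omega : ¬ day - 1 ≤ 0)]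

set_option maxRecDepth 8192 in
theorem gl_agree_of_le_12 (day : Int) (h : day ≤ 12) :
    generate_lyrics day = generate_lyrics_alt day := by
  rcases (by omega : day ≤ 0 ∨ 0 < day) with h0 | h0
  · unfold generate_lyrics generate_lyrics_alt
    rw [PySem.List.pyRange_neg_one_eq_nil h0, if_pos h0]
    rfl
  · interval_cases day <;> decide

theorem gl_agree_high (n : Nat) :
    generate_lyrics (12 + (n : Int)) = generate_lyrics_alt (12 + (n : Int)) := by
  induction n with
  | zero => exact gl_agree_of_le_12 12 (by omega)
  | succ k ih =>
      have h13 : (13:Int) ≤ 12 + ((k+1 : Nat) : Int) := by push_cast; omega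
      rw [gl_step_13 _ h13, alt_step_13 _ h13]
      have : (12 : Int) + ((k+1 : Nat) : Int) - 1 = 12 + (k : Int) := by push_cast; ring
      rw [this]; exact ih

-- ===== VERDICT (by name: the statement is the Claim_ definition above) =====
theorem generate_lyrics_spec : Claim_equal_generate_lyrics := by
  intro day _
  unfold Spec_generate_lyrics
  rcases (by omega : day ≤ 12 ∨ 12 < day) with h | h
  · exact gl_agree_of_le_12 day h
  · have := gl_agree_high (day - 12).toNat
    have hd : (12 : Int) + ((day - 12).toNat : Int) = day := by omega
    rwa [hd] at this
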